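-- pv_equiv track=rewrite | github.com/lukasj3731/Advent_of_Code | AOC2017/day09.py | count_score
-- ===== SOURCE A (Python) =====
-- def count_score(stream):
--     points = level = 0
--     for i in range(len(stream)):
--         if stream[i] == '{':
--             level += 1
--             points += level
--         if stream[i] == '}':
--             level -= 1
--     return points
-- ===== SOURCE B (Python) =====
-- def count_score(stream):
--     # pass 1: signed deltas, then running cumulative depth table
--     deltas = [1 if c == '{' else (-1 if c == '}' else 0) for c in stream]
--     depths = []
--     total = 0
--     for d in deltas:
--         total += d
--         depths.append(total)
--     # pass 2: sum the cumulative depth at every '{' position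
--     return sum(d for c, d in zip(stream, depths) if c == '{')
-- ===== Notes on version B (the rewrite author's own statement) =====
-- stated objective: alternative
-- what changed: Replaces the single-pass running-counter fold by a build-then-select shape: map the stream to signed deltas, materialize the prefix-sum depth table, then sum the table entries at '{' positions.
import Mathlib
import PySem

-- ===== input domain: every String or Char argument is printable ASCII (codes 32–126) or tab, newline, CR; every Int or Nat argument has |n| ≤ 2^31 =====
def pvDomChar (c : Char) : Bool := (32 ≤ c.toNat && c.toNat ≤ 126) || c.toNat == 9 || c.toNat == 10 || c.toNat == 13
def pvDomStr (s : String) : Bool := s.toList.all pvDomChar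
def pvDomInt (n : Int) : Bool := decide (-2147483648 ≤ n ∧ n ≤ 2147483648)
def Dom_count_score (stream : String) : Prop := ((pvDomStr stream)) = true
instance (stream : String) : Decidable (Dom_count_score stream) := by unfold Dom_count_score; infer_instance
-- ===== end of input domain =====

-- B replaces A's single-pass running counter by a build-then-select two-pass shape
-- (delta map, prefix-sum depth table, then sum of table entries at '{' positions); alternative, same cost.


-- ===== PORT A =====
-- loop body: state (points, level); branches in source order
def aStep (st : Int × Int) (c : Char) : Int × Int :=
  let st := if c = '{' then (st.1 + (st.2 + 1), st.2 + 1) else st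
  let st := if c = '}' then (st.1, st.2 - 1) else st
  st

def count_score (stream : String) : Int :=
  (stream.toList.foldl aStep (0, 0)).1

-- ===== PORT B =====
def bDelta (c : Char) : Int := if c = '{' then 1 else if c = '}' then -1 else 0

def bScan (acc : List Int × Int) (d : Int) : List Int × Int := (acc.1 ++ [acc.2 + d], acc.2 + d)

def bPick (s : Int) (p : Char × Int) : Int := if p.1 = '{' then s + p.2 else s

def count_score_alt (stream : String) : Int :=
  let deltas := stream.toList.map bDelta
  let depths := (deltas.foldl bScan ([], 0)).1
  (stream.toList.zip depths).foldl bPick 0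

-- ===== PRECONDITION & SPEC =====
def Spec_count_score (stream : String) (out : Int) : Prop := out = count_score_alt stream
instance (stream : String) (out : Int) : Decidable (Spec_count_score stream out) := by unfold Spec_count_score; infer_instance

-- ===== CLAIM (what is proved, stated in full; the proofs are below) =====
def Claim_equal_count_score : Prop := ∀ (stream : String), Dom_count_score stream → Spec_count_score stream (count_score stream)

-- ===== LEMMAS AND PROOFS =====

/-- common specification: score of `cs` starting at level `t`. -/
def pvScore : List Char → Int → Int
  | [], _ => 0
  | c :: cs, t => (if c = '{' then t + 1 else 0) + pvScore cs (t + bDelta c)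

lemma a_fold (cs : List Char) : ∀ p t : Int,
    (cs.foldl aStep (p, t)).1 = p + pvScore cs t := by
  induction cs with
  | nil => intro p t; simp [pvScore]
  | cons c cs ih =>
    intro p t
    by_cases h1 : c = '{'
    · simp [List.foldl, aStep, h1, pvScore, bDelta, ih, add_assoc]
    · by_cases h2 : c = '}'
      · simp [List.foldl, aStep, h2, pvScore, bDelta, ih, sub_eq_add_neg]
      · simp [List.foldl, aStep, h1, h2, pvScore, bDelta, ih]

lemma b_scan (ds : List Int) : ∀ (a : List Int) (t : Int),
    ds.foldl bScan (a, t)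
      = (a ++ (ds.foldl bScan ([], t)).1, (ds.foldl bScan ([], t)).2) := by
  induction ds with
  | nil => intro a t; simp
  | cons d ds ih =>
    intro a t
    simp only [List.foldl, bScan, List.nil_append]
    rw [ih (a ++ [t + d]), ih [t + d]]
    simp

/-- the zip-sum of B over the prefix table starting at `t` equals the common spec. -/
lemma b_zip (cs : List Char) : ∀ (t s : Int),
    ((cs.zip ((cs.map bDelta).foldl bScan ([], t)).1).foldl bPick s) = s + pvScore cs t := by
  induction cs with
  | nil => intro t s; simp [pvScore]
  | cons c cs ih =>
    intro t s
    simp only [List.map, List.foldl, bScan, List.nil_append]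
    rw [b_scan]
    simp only [List.zip_cons_cons, List.foldl, List.singleton_append]
    rw [ih]
    by_cases h1 : c = '{'
    · simp [h1, pvScore, bPick, bDelta, add_assoc]
    · simp [h1, pvScore, bPick, bDelta]

-- ===== VERDICT (by name: the statement is the Claim_ definition above) =====
theorem count_score_spec : Claim_equal_count_score := by
  intro stream _
  show count_score stream = count_score_alt stream
  unfold count_score count_score_alt
  rw [a_fold, b_zip]
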